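-- pv_equiv track=rewrite | github.com/koskirillal/perachieve | basepract.py | to_name_old_version
-- ===== SOURCE A (Python) =====
-- def to_name_old_version(a: list):
--     b = list()
--     for i in range(len(a)):
--         olymp = ""
--         prof = ""
--         f = 0
--         ii = 0
--         for j in range(len(a[i])):
--             if (a[i][j] == '"'):
--                 f += 1
--                 continue
--             if (f > 1):
--                 ii = j
--                 break
--             if (f == 1):
--                 olymp += a[i][j]
--         f = 0
--         for j in range(ii, len(a[i])):
--             if (a[i][j] == '('):
--                 f = 1
--                 continue
--             elif (a[i][j] == ')'):
--                 f = 0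
--                 break
--             elif (f == 1):
--                 prof += a[i][j]
--         b.append((olymp))
--     i = 0
--     n = len(b)
--     while (i < n):
--         if (b[i] == '' ):
--             b.remove(b[i])
--             i -= 1
--             n -= 1
--         i += 1
--     return b
-- ===== SOURCE B (Python) =====
-- def to_name_old_version(a: list):
--     b = []
--     for s in a:
--         _, sep, after = s.partition('"')
--         if sep:
--             quoted = after.partition('"')[0]
--             if quoted:
--                 b.append(quoted)
--     return b
-- ===== Notes on version B (the rewrite author's own statement) =====
-- stated objective: simpler
-- what changed: Replaced the char-by-char quote-counting state machine, the dead parenthesis-scanning loop and the in-place remove() compaction pass (quadratic when many items yield no quoted text) with one str.partition('"') per item and a direct filtered append.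
import Mathlib
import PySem

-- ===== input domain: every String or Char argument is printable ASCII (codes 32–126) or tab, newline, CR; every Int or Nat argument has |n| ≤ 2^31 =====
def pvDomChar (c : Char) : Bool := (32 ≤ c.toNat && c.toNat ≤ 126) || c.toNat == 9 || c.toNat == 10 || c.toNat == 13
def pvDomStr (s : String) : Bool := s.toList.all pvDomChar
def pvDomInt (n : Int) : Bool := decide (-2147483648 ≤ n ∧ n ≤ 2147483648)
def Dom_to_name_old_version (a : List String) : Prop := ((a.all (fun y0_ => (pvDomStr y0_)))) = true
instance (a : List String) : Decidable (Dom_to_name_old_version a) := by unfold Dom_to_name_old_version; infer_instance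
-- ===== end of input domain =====

-- B replaces A's quote-counting state machine, dead parenthesis loop and remove() compaction
-- pass with one partition('"') per item and a filtered append (objective: simpler).


-- ===== PORT A =====
-- first inner loop: build olymp (chars between the first pair of '"'), record break index ii
def pvAScan1 : List Char → Nat → List Char → Nat → Nat → (List Char × Nat)
  | [], _, olymp, _, ii => (olymp, ii)
  | c :: rest, j, olymp, f, ii =>
    if c = '"' then pvAScan1 rest (j+1) olymp (f+1) ii
    else if f > 1 then (olymp, j)                      -- ii = j; break
    else if f = 1 then pvAScan1 rest (j+1) (olymp ++ [c]) f ii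
    else pvAScan1 rest (j+1) olymp f ii

-- second inner loop: build prof between '(' and ')' from index ii (its result is never used by A)
def pvAScan2 : List Char → List Char → Nat → List Char
  | [], prof, _ => prof
  | c :: rest, prof, f =>
    if c = '(' then pvAScan2 rest prof 1
    else if c = ')' then prof                          -- break
    else if f = 1 then pvAScan2 rest (prof ++ [c]) f
    else pvAScan2 rest prof f

-- the trailing "while i < n: remove empty" compaction loop, literally
def pvAWhile (b : List String) (i n : Nat) : List String :=
  if h : i < n then
    if (PySem.List.pyGet? b (i : Int)).getD "" = "" then
      pvAWhile ((PySem.List.remove? b ((PySem.List.pyGet? b (i : Int)).getD "")).getD b) i (n - 1)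
    else pvAWhile b (i + 1) n
  else b
termination_by n - i

def to_name_old_version (a : List String) : List String :=
  let b := a.map (fun s =>
    let r := pvAScan1 s.toList 0 [] 0 0
    let _prof := pvAScan2 (s.toList.drop r.2) [] 0    -- computed by A, never used
    String.ofList r.1)
  pvAWhile b 0 b.length

-- ===== PORT B =====
-- s.partition(c) for a one-char separator, ported exactly via takeWhile/dropWhile
def pvPartition1 (cs : List Char) (c : Char) : List Char × Bool × List Char :=
  if c ∈ cs then (cs.takeWhile (· ≠ c), true, (cs.dropWhile (· ≠ c)).tail)
  else (cs, false, [])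

def to_name_old_version_alt (a : List String) : List String :=
  a.foldl (fun b s =>
    let p := pvPartition1 s.toList '"'
    if p.2.1 then
      let quoted := (pvPartition1 p.2.2 '"').1
      if quoted ≠ [] then b ++ [String.ofList quoted] else b
    else b) []

-- ===== PRECONDITION & SPEC =====
def Spec_to_name_old_version (a : List String) (out : List String) : Prop := out = to_name_old_version_alt a
instance (a : List String) (out : List String) : Decidable (Spec_to_name_old_version a out) := by unfold Spec_to_name_old_version; infer_instance

-- ===== CLAIM (what is proved, stated in full; the proofs are below) =====
def Claim_equal_to_name_old_version : Prop := ∀ (a : List String), Dom_to_name_old_version a → Spec_to_name_old_version a (to_name_old_version a)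

-- ===== LEMMAS AND PROOFS =====

lemma part1_fst (cs : List Char) (c : Char) : (pvPartition1 cs c).1 = cs.takeWhile (· ≠ c) := by
  unfold pvPartition1
  split_ifs with h
  · rfl
  · symm
    rw [List.takeWhile_eq_self_iff]
    intro x hx
    simp only [ne_eq, decide_eq_true_eq]
    exact fun e => h (e ▸ hx)

lemma part2_fst (cs : List Char) (c : Char) : (pvPartition1 cs c).2.1 = decide (c ∈ cs) := by
  unfold pvPartition1
  split_ifs with h <;> simp [h]

lemma part2_snd_of_mem (cs : List Char) (c : Char) (h : c ∈ cs) :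
    (pvPartition1 cs c).2.2 = (cs.dropWhile (· ≠ c)).tail := by
  unfold pvPartition1
  rw [if_pos h]

-- A's first inner loop after the second quote was seen: olymp no longer changes
lemma pvAScan1_phase2 (cs : List Char) (j : Nat) (acc : List Char) (f ii : Nat) (hf : 1 < f) :
    (pvAScan1 cs j acc f ii).1 = acc := by
  induction cs generalizing j f with
  | nil => rfl
  | cons c rest ih =>
    by_cases h1 : c = '"'
    · rw [pvAScan1, if_pos h1]
      exact ih (j+1) (f+1) (by omega)
    · rw [pvAScan1, if_neg h1, if_pos hf]

-- between the first and second quote (f = 1): olymp appends up to the next quote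
lemma pvAScan1_phase1 (cs : List Char) (j : Nat) (acc : List Char) (ii : Nat) :
    (pvAScan1 cs j acc 1 ii).1 = acc ++ cs.takeWhile (· ≠ '"') := by
  induction cs generalizing j acc with
  | nil => simp [pvAScan1]
  | cons c rest ih =>
    by_cases h1 : c = '"'
    · subst h1
      rw [pvAScan1, if_pos rfl, pvAScan1_phase2 _ _ _ _ _ (by omega)]
      simp
    · rw [pvAScan1, if_neg h1, if_neg (by omega), if_pos rfl, ih]
      simp [h1]

-- before any quote (f = 0): skip to after the first quote, or end with olymp = []
lemma pvAScan1_phase0 (cs : List Char) (j : Nat) (ii : Nat) :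
    (pvAScan1 cs j [] 0 ii).1 =
      if '"' ∈ cs then ((cs.dropWhile (· ≠ '"')).tail).takeWhile (· ≠ '"') else [] := by
  induction cs generalizing j with
  | nil => simp [pvAScan1]
  | cons c rest ih =>
    by_cases h1 : c = '"'
    · subst h1
      rw [pvAScan1, if_pos rfl, pvAScan1_phase1]
      simp
    · rw [pvAScan1, if_neg h1, if_neg (by omega), if_neg (by omega), ih]
      simp only [List.mem_cons, List.dropWhile_cons, ne_eq, h1, not_false_eq_true,
        decide_eq_true_eq, if_true, decide_true]
      have : ¬ ('"' = c) := fun e => h1 e.symm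
      simp [this]

-- remove? of "" on a list whose prefix p is all nonempty removes the head of the suffix
lemma remove_empty_append (p rest : List String) (hp : ∀ x ∈ p, x ≠ "") :
    PySem.List.remove? (p ++ "" :: rest) "" = some (p ++ rest) := by
  induction p with
  | nil => simp [PySem.List.remove?_cons_self]
  | cons x xs ih =>
    have hx : x ≠ "" := hp x (by simp)
    rw [List.cons_append, PySem.List.remove?_cons_of_ne _ hx,
        ih (fun y hy => hp y (by simp [hy]))]
    rfl

lemma pvAWhile_filter (s p : List String) (hp : ∀ x ∈ p, x ≠ "") :
    pvAWhile (p ++ s) p.length (p ++ s).length = p ++ s.filter (· ≠ "") := by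
  induction s generalizing p with
  | nil => rw [pvAWhile]; simp
  | cons x rest ih =>
    rw [pvAWhile]
    have hlt : p.length < (p ++ x :: rest).length := by simp
    have hget : (PySem.List.pyGet? (p ++ x :: rest) (p.length : Int)).getD "" = x := by
      rw [PySem.List.pyGet?_natCast]
      simp
    rw [dif_pos hlt, hget]
    by_cases hx : x = ""
    · subst hx
      rw [if_pos rfl, remove_empty_append p rest hp]
      have hn : (p ++ "" :: rest).length - 1 = (p ++ rest).length := by simp
      simp only [Option.getD_some, hn]
      rw [ih p hp]
      simp
    · rw [if_neg hx]
      have h1 : p.length + 1 = (p ++ [x]).length := by simp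
      have h2 : p ++ x :: rest = (p ++ [x]) ++ rest := by simp
      rw [h1, h2, ih (p ++ [x]) (by intro y hy; rcases List.mem_append.1 hy with h | h
                                    · exact hp y h
                                    · simp at h; simpa [h] using hx)]
      simp [hx]

-- per item: A's olymp string
lemma olymp_eq (s : String) :
    String.ofList (pvAScan1 s.toList 0 [] 0 0).1 =
      if '"' ∈ s.toList then
        String.ofList (((s.toList.dropWhile (· ≠ '"')).tail).takeWhile (· ≠ '"'))
      else "" := by
  rw [pvAScan1_phase0]
  split_ifs <;> rfl

lemma foldl_b_step (l : List String) (b : List String) :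
    l.foldl (fun b s =>
      let p := pvPartition1 s.toList '"'
      if p.2.1 then
        let quoted := (pvPartition1 p.2.2 '"').1
        if quoted ≠ [] then b ++ [String.ofList quoted] else b
      else b) b
    = b ++ (l.map (fun s => String.ofList (pvAScan1 s.toList 0 [] 0 0).1)).filter (· ≠ "") := by
  induction l generalizing b with
  | nil => simp
  | cons s rest ih =>
    simp only [List.foldl_cons, List.map_cons, List.filter_cons]
    rw [ih, olymp_eq]
    simp only [part2_fst]
    by_cases hm : '"' ∈ s.toList
    · simp only [hm, decide_true, if_true, part2_snd_of_mem _ _ hm, part1_fst]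
      set q := ((s.toList.dropWhile (· ≠ '"')).tail).takeWhile (· ≠ '"') with hq
      by_cases hq0 : q = []
      · simp [hq0]
      · have hne : String.ofList q ≠ "" := fun h => hq0 (String.ofList_eq_empty_iff.1 h)
        simp [hq0, hne]
    · simp [hm]

-- ===== VERDICT (by name: the statement is the Claim_ definition above) =====
theorem to_name_old_version_spec : Claim_equal_to_name_old_version := by
  intro a _
  unfold Spec_to_name_old_version to_name_old_version to_name_old_version_alt
  rw [foldl_b_step a []]
  have h := pvAWhile_filter (a.map (fun s =>
      let r := pvAScan1 s.toList 0 [] 0 0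
      let _prof := pvAScan2 (s.toList.drop r.2) [] 0
      String.ofList r.1)) [] (by intro x hx; exact absurd hx (List.not_mem_nil))
  simp only [List.nil_append, List.length_nil] at h
  rw [h]
  rfl
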